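-- pv_equiv track=rewrite | github.com/82deutschmark/SpyEngine | segment_maker.py | _extract_character_interactions
-- ===== SOURCE A (Python) =====
-- from typing import Dict, Any, List, Optional
--
-- def _extract_character_interactions(narrative_text: str, characters: List[Dict[str, Any]]) -> Dict[str, List[str]]:
--     """Extract character interactions from narrative text."""
--     interactions = {}
--
--     # Create a mapping of character names to their full info
--     char_map = {char.get('name', '').lower(): char for char in characters}
--
--     # Split narrative into sentences
--     sentences = narrative_text.split('.')
--
--     for sentence in sentences:
--         sentence = sentence.strip()
--         if not sentence:
--             continue
--
--         # Check each character
--         for char_name, char_info in char_map.items():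
--             if char_name in sentence.lower():
--                 if char_name not in interactions:
--                     interactions[char_name] = []
--                 interactions[char_name].append(sentence)
--
--     return interactions
-- ===== SOURCE B (Python) =====
-- def _extract_character_interactions(narrative_text, characters):
--     """Character-major rewrite: dedup the lowered names once, pre-strip and
--     pre-lower the sentences once, compute the key order, then gather each
--     character's sentences with one comprehension per character."""
--     names = list(dict.fromkeys(c.get('name', '').lower() for c in characters))
--     pieces = [p.strip() for p in narrative_text.split('.')]
--     sents = [(s, s.lower()) for s in pieces if s]
--     order = list(dict.fromkeys(n for _, low in sents for n in names if n in low))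
--     return {n: [s for s, low in sents if n in low] for n in order}
-- ===== Notes on version B (the rewrite author's own statement) =====
-- stated objective: alternative
-- what changed: Replaces the sentence-major dict-building loop (membership test + in-place append per (sentence, character) pair) by a character-major formulation: names deduped once, sentences stripped and lowercased once, the key order derived as the deduped stream of matches, and each character's sentence list gathered by one comprehension; the lowercased sentence is computed once per sentence instead of once per (sentence, character).
import Mathlib
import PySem

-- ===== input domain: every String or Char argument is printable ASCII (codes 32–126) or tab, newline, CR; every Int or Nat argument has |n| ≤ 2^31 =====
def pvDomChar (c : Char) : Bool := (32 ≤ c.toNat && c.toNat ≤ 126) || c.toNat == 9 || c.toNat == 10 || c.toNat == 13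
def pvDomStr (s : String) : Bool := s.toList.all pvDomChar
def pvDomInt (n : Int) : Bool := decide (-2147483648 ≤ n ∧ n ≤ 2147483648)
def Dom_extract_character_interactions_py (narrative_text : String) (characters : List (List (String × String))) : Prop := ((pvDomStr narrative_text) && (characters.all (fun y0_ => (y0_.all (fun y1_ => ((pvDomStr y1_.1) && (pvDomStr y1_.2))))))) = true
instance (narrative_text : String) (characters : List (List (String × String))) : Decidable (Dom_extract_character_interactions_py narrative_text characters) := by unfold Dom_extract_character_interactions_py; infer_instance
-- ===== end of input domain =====

-- B replaces A's sentence-major dict-building loop by a character-major gather with a precomputed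
-- key order; same result, the lowercased sentence is computed once per sentence (objective: alternative).

-- ===== PORT A =====
def extract_character_interactions_py (narrative_text : String) (characters : List (List (String × String))) : List (String × List String) :=
  -- char_map = {char.get('name', '').lower(): char for char in characters}
  let char_map : PySem.Dict String (List (String × String)) :=
    characters.foldl (fun d ch => d.insert (PySem.Str.lower ((PySem.Dict.mk ch).getD "name" "")) ch) (PySem.Dict.mk [])
  -- sentences = narrative_text.split('.')  (the separator is the literal ".", never empty, so split? is `some`)
  let sentences : List String := (PySem.Str.split? narrative_text ".").getD []
  let interactions : PySem.Dict String (List String) :=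
    sentences.foldl (fun inter sentence =>
      let s := PySem.Str.strip sentence
      if s == "" then inter
      else
        char_map.items.foldl (fun inter kv =>
          if PySem.Str.isIn kv.1 (PySem.Str.lower s) then
            let inter := if inter.contains kv.1 then inter else inter.insert kv.1 []
            inter.modify kv.1 [] (fun l => l ++ [s])
          else inter) inter) (PySem.Dict.mk [])
  interactions.items

-- ===== PORT B =====
def extract_character_interactions_py_alt (narrative_text : String) (characters : List (List (String × String))) : List (String × List String) :=
  let names : List String :=
    PySem.List.dedup (characters.map (fun c => PySem.Str.lower ((PySem.Dict.mk c).getD "name" "")))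
  let pieces : List String := ((PySem.Str.split? narrative_text ".").getD []).map PySem.Str.strip
  let sents : List (String × String) := (pieces.filter (fun s => !(s == ""))).map (fun s => (s, PySem.Str.lower s))
  let order : List String :=
    PySem.List.dedup (sents.flatMap (fun p => names.filter (fun n => PySem.Str.isIn n p.2)))
  -- the keys `order` come from dict.fromkeys, hence are distinct: the dict comprehension's items are this map
  order.map (fun n => (n, (sents.filter (fun p => PySem.Str.isIn n p.2)).map (fun p => p.1)))

-- ===== PRECONDITION & SPEC =====
def Spec_extract_character_interactions_py (narrative_text : String) (characters : List (List (String × String))) (out : List (String × List String)) : Prop := out = extract_character_interactions_py_alt narrative_text characters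
instance (narrative_text : String) (characters : List (List (String × String))) (out : List (String × List String)) : Decidable (Spec_extract_character_interactions_py narrative_text characters out) := by unfold Spec_extract_character_interactions_py; infer_instance

-- ===== CLAIM (what is proved, stated in full; the proofs are below) =====
def Claim_equal_extract_character_interactions_py : Prop := ∀ (narrative_text : String) (characters : List (List (String × String))), Dom_extract_character_interactions_py narrative_text characters → Spec_extract_character_interactions_py narrative_text characters (extract_character_interactions_py narrative_text characters)

-- ===== LEMMAS AND PROOFS =====

-- `d.contains` is membership of the key list
theorem pvContainsIff {ν : Type} (d : PySem.Dict String ν) (n : String) :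
    d.contains n = true ↔ n ∈ d.keys := by
  simp [PySem.Dict.contains, PySem.Dict.keys, List.any_eq_true, List.mem_map]

-- equal key lists give equal `contains`
theorem pvContainsCongr {ν ν' : Type} (d : PySem.Dict String ν) (d' : PySem.Dict String ν')
    (h : d.keys = d'.keys) (x : String) : d.contains x = d'.contains x := by
  rw [Bool.eq_iff_iff, pvContainsIff, pvContainsIff, h]

-- inserting: an overwrite keeps the key list, a fresh key is appended (= Set.add)
theorem pvKeysInsert {ν : Type} (d : PySem.Dict String ν) (k : String) (v : ν) :
    (d.insert k v).keys = PySem.Set.add d.keys k := by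
  by_cases hc : d.contains k = true
  · have hmem : k ∈ d.keys := (pvContainsIff d k).mp hc
    rw [show PySem.Set.add d.keys k = d.keys from by simp [PySem.Set.add, PySem.Set.contains, hmem]]
    simp only [PySem.Dict.insert, hc, if_pos, PySem.Dict.keys]
    rw [List.map_map]
    apply List.map_congr_left
    intro p _
    by_cases h : p.1 == k
    · simp [Function.comp, (beq_iff_eq.mp h).symm]
    · simp [Function.comp, h]
  · have hmem : k ∉ d.keys := fun h => hc ((pvContainsIff d k).mpr h)
    rw [show PySem.Set.add d.keys k = d.keys ++ [k] from by simp [PySem.Set.add, PySem.Set.contains, hmem]]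
    simp [PySem.Dict.insert, hc, PySem.Dict.keys]

-- keys of the char_map fold (Python's dict comprehension): ordered dedup of the mapped keys
theorem pvCharMapKeys (g : List (String × String) → String) :
    ∀ (chs : List (List (String × String))) (d : PySem.Dict String (List (String × String))),
      (chs.foldl (fun d ch => d.insert (g ch) ch) d).keys = PySem.Set.update d.keys (chs.map g) := by
  intro chs
  induction chs with
  | nil => intro d; simp [PySem.Set.update]
  | cons ch chs ih =>
      intro d
      simp only [List.foldl_cons, List.map_cons]
      rw [ih, pvKeysInsert]
      rfl

-- a nodup batch folded into a set: append the genuinely new elements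
theorem pvSetFoldAdd : ∀ (b : List String) (s0 : List String), b.Nodup →
    b.foldl PySem.Set.add s0 = s0 ++ b.filter (fun x => !(decide (x ∈ s0))) := by
  intro b
  induction b with
  | nil => intro s0 _; simp
  | cons x b ih =>
      intro s0 hnd
      have hx : x ∉ b := (List.nodup_cons.mp hnd).1
      have hb : b.Nodup := (List.nodup_cons.mp hnd).2
      simp only [List.foldl_cons]
      by_cases hc : x ∈ s0
      · have h1 : PySem.Set.add s0 x = s0 := by
          simp [PySem.Set.add, PySem.Set.contains, hc]
        rw [h1, ih s0 hb, List.filter_cons]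
        simp [hc]
      · have h1 : PySem.Set.add s0 x = s0 ++ [x] := by
          simp [PySem.Set.add, PySem.Set.contains, hc]
        rw [h1, ih (s0 ++ [x]) hb, List.filter_cons]
        have h2 : b.filter (fun y => !(decide (y ∈ s0 ++ [x])))
                = b.filter (fun y => !(decide (y ∈ s0))) := by
          apply List.filter_congr
          intro y hy
          have hyx : y ≠ x := fun h => hx (h ▸ hy)
          simp [List.mem_append, hyx]
        rw [h2]
        simp [hc, List.append_assoc]

-- ordered dedup of an append, when the second block is nodup
theorem pvDedupAppend (a b : List String) (hb : b.Nodup) :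
    PySem.List.dedup (a ++ b)
      = PySem.List.dedup a ++ b.filter (fun x => !(decide (x ∈ PySem.List.dedup a))) := by
  show PySem.Set.ofList (a ++ b) = _
  rw [PySem.Set.ofList, List.foldl_append]
  exact pvSetFoldAdd b (PySem.Set.ofList a) hb

-- with nodup keys, find? at a present key returns that entry
theorem pvFindVal : ∀ (l : List (String × List String)) (n : String) (p : String × List String),
    (l.map Prod.fst).Nodup → p ∈ l → p.1 = n →
    List.find? (fun e => e.1 == n) l = some p := by
  intro l
  induction l with
  | nil => intro n p _ hp; simp at hp
  | cons a l ih =>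
      intro n p hnd hp hpn
      rw [List.map_cons] at hnd
      have hnd1 : a.1 ∉ l.map Prod.fst := (List.nodup_cons.mp hnd).1
      have hnd2 : (l.map Prod.fst).Nodup := (List.nodup_cons.mp hnd).2
      rcases List.mem_cons.mp hp with h | h
      · subst h; simp [List.find?, hpn]
      · have ha : a.1 ≠ n := by
          intro hEq
          apply hnd1
          rw [hEq, ← hpn]
          exact List.mem_map.mpr ⟨p, h, rfl⟩
        simp only [List.find?, show (a.1 == n) = false by simp [ha]]
        exact ih n p hnd2 h hpn

-- in-place append at a present key, with nodup keys: a map over the items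
theorem pvModifyItems (d : PySem.Dict String (List String)) (n s : String)
    (hnd : d.keys.Nodup) (hc : d.contains n = true) :
    (d.modify n [] (fun l => l ++ [s])).items
      = d.items.map (fun e => if e.1 == n then (e.1, e.2 ++ [s]) else e) := by
  simp only [PySem.Dict.modify, PySem.Dict.insert, hc, if_pos]
  apply List.map_congr_left
  intro p hp
  by_cases h : p.1 == n
  · have hfind : List.find? (fun e => e.1 == n) d.items = some p :=
      pvFindVal d.items n p (by simpa [PySem.Dict.keys] using hnd) hp (beq_iff_eq.mp h)
    have hd : d.getD n [] = p.2 := by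
      simp [PySem.Dict.getD, PySem.Dict.get?, hfind]
    simp [hd, beq_iff_eq.mp h]
  · simp [h]

-- items characterization of one sentence's inner loop over the (nodup) character names
theorem pvInnerFold (q : String → Bool) (s : String) :
    ∀ (ns : List String) (d : PySem.Dict String (List String)),
      ns.Nodup → d.keys.Nodup →
      (ns.foldl (fun d n =>
          if q n then
            (if d.contains n then d else d.insert n []).modify n [] (fun l => l ++ [s])
          else d) d).items
        = d.items.map (fun e => if decide (e.1 ∈ ns) && q e.1 then (e.1, e.2 ++ [s]) else e)
          ++ (ns.filter (fun n => q n && !(d.contains n))).map (fun n => (n, ([s] : List String))) := by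
  intro ns
  induction ns with
  | nil => intro d _ _; simp
  | cons n ns ih =>
      intro d hnd hkd
      have hn : n ∉ ns := (List.nodup_cons.mp hnd).1
      have hns : ns.Nodup := (List.nodup_cons.mp hnd).2
      simp only [List.foldl_cons]
      by_cases hq : q n = true
      · by_cases hc : d.contains n = true
        · -- existing key: in-place append, position kept
          rw [if_pos hq, if_pos hc]
          have hitems : (d.modify n [] (fun l => l ++ [s])).items
              = d.items.map (fun e => if e.1 == n then (e.1, e.2 ++ [s]) else e) :=
            pvModifyItems d n s hkd hc
          have hkeys : (d.modify n [] (fun l => l ++ [s])).keys = d.keys := by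
            simp only [PySem.Dict.keys, hitems, List.map_map]
            apply List.map_congr_left
            intro p _
            by_cases h : p.1 == n
            · simp [Function.comp, (beq_iff_eq.mp h).symm]
            · simp [Function.comp, h]
          rw [ih (d.modify n [] (fun l => l ++ [s])) hns (hkeys ▸ hkd)]
          rw [hitems, List.map_map, List.filter_cons]
          have hfilt : ns.filter (fun m => q m && !((d.modify n [] (fun l => l ++ [s])).contains m))
                     = ns.filter (fun m => q m && !(d.contains m)) := by
            apply List.filter_congr
            intro m _
            rw [pvContainsCongr _ _ hkeys]
          rw [hfilt]
          simp only [hq, hc, Bool.not_true, Bool.and_false]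
          congr 1
          apply List.map_congr_left
          intro p hp
          by_cases h : p.1 == n
          · have hpn : p.1 = n := beq_iff_eq.mp h
            simp [Function.comp, hpn, hn, hq]
          · have hpn : p.1 ≠ n := fun hEq => h (beq_iff_eq.mpr hEq)
            simp [Function.comp, h, List.mem_cons, hpn]
        · -- new key: appended at the end with its first sentence
          rw [if_pos hq, if_neg hc]
          have hnokey : ∀ p ∈ d.items, p.1 ≠ n := by
            intro p hp hEq
            apply hc
            rw [pvContainsIff]
            exact List.mem_map.mpr ⟨p, hp, hEq⟩
          have hins : (d.insert n []).items = d.items ++ [(n, ([] : List String))] := by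
            simp [PySem.Dict.insert, hc]
          have hc1 : (d.insert n []).contains n = true := by
            simp [PySem.Dict.contains, hins]
          have hnmem : n ∉ d.keys := fun h => hc ((pvContainsIff d n).mpr h)
          have hkeyse : (d.insert n []).keys = d.keys ++ [n] := by
            rw [pvKeysInsert]
            simp [PySem.Set.add, PySem.Set.contains, hnmem]
          have hknde : (d.insert n []).keys.Nodup := by
            rw [hkeyse]
            exact List.Nodup.append hkd (List.nodup_singleton n) (by
              intro a ha hb; simp at hb; subst hb; exact hnmem ha)
          have hitems2 : ((d.insert n []).modify n [] (fun l => l ++ [s])).items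
              = d.items ++ [(n, [s])] := by
            rw [pvModifyItems (d.insert n []) n s hknde hc1, hins, List.map_append]
            congr 1
            · rw [show d.items.map (fun e => if e.1 == n then (e.1, e.2 ++ [s]) else e)
                    = d.items.map (fun e => e) from
                  List.map_congr_left (by intro p hp; simp [hnokey p hp])]
              simp
            · simp
          have hkeys2 : ((d.insert n []).modify n [] (fun l => l ++ [s])).keys
              = d.keys ++ [n] := by
            simp [PySem.Dict.keys, hitems2]
          have hkd2 : ((d.insert n []).modify n [] (fun l => l ++ [s])).keys.Nodup := by
            rw [hkeys2]
            exact List.Nodup.append hkd (List.nodup_singleton n) (by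
              intro a ha hb; simp at hb; subst hb; exact hnmem ha)
          rw [ih _ hns hkd2, hitems2, List.map_append, List.filter_cons]
          have hfilt : ns.filter (fun m => q m && !(((d.insert n []).modify n [] (fun l => l ++ [s])).contains m))
                     = ns.filter (fun m => q m && !(d.contains m)) := by
            apply List.filter_congr
            intro m hm
            have hmn : m ≠ n := fun hEq => hn (hEq ▸ hm)
            have : ((d.insert n []).modify n [] (fun l => l ++ [s])).contains m = d.contains m := by
              rw [Bool.eq_iff_iff, pvContainsIff, pvContainsIff, hkeys2]
              simp [List.mem_append, hmn]
            rw [this]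
          rw [hfilt]
          have hlast : ([((n : String), ([s] : List String))] : List (String × List String)).map
              (fun e => if decide (e.1 ∈ ns) && q e.1 then (e.1, e.2 ++ [s]) else e)
              = [(n, [s])] := by
            simp [hn]
          rw [hlast]
          simp only [hq, hc, Bool.not_false, Bool.and_true, if_pos]
          have hmap : d.items.map (fun e => if decide (e.1 ∈ ns) && q e.1 then (e.1, e.2 ++ [s]) else e)
                    = d.items.map (fun e => if decide (e.1 ∈ n :: ns) && q e.1 then (e.1, e.2 ++ [s]) else e) := by
            apply List.map_congr_left
            intro p hp
            simp [List.mem_cons, hnokey p hp]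
          rw [hmap]
          simp [List.append_assoc]
      · -- no match for this name: nothing changes
        have hq' : q n = false := by
          cases h : q n with
          | true => exact absurd h hq
          | false => rfl
        rw [if_neg hq]
        rw [ih d hns hkd, List.filter_cons]
        simp only [hq', Bool.false_and]
        congr 1
        apply List.map_congr_left
        intro p hp
        by_cases h : p.1 = n
        · simp [List.mem_cons, h, hq']
        · simp [List.mem_cons, h]

-- the whole sentence loop: keys in first-match order, each with all its matching sentences
theorem pvOuterFold (q : String → String → Bool) (ns : List String) (hns : ns.Nodup) :
    ∀ ss : List String,
      (ss.foldl (fun d s => ns.foldl (fun d n =>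
          if q n s then
            (if d.contains n then d else d.insert n []).modify n [] (fun l => l ++ [s])
          else d) d) (PySem.Dict.mk [])).items
      = (PySem.List.dedup (ss.flatMap (fun s => ns.filter (fun n => q n s)))).map
          (fun n => (n, ss.filter (fun s => q n s))) := by
  intro ss
  induction ss using List.reverseRecOn with
  | nil => simp [PySem.List.dedup, PySem.Set.ofList, PySem.Set.empty]
  | append_singleton u s ih =>
      rw [List.foldl_append, List.foldl_cons, List.foldl_nil]
      have hsub : ∀ n ∈ PySem.List.dedup (u.flatMap (fun s => ns.filter (fun n => q n s))), n ∈ ns := by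
        intro n hmem
        have h1 : n ∈ u.flatMap (fun s => ns.filter (fun n => q n s)) :=
          (PySem.List.mem_dedup _ _).mp hmem
        rcases List.mem_flatMap.mp h1 with ⟨s', _, hin⟩
        exact (List.mem_filter.mp hin).1
      have hordnd : (PySem.List.dedup (u.flatMap (fun s => ns.filter (fun n => q n s)))).Nodup :=
        PySem.List.nodup_dedup _
      have hkeys : (u.foldl (fun d s => ns.foldl (fun d n =>
          if q n s then
            (if d.contains n then d else d.insert n []).modify n [] (fun l => l ++ [s])
          else d) d) (PySem.Dict.mk [])).keys
          = PySem.List.dedup (u.flatMap (fun s => ns.filter (fun n => q n s))) := by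
        simp only [PySem.Dict.keys, ih, List.map_map]
        simp [Function.comp_def]
      rw [pvInnerFold (fun n => q n s) s ns _ hns (hkeys ▸ hordnd)]
      rw [ih, List.map_map]
      have hcont : ∀ x, (u.foldl (fun d s => ns.foldl (fun d n =>
          if q n s then
            (if d.contains n then d else d.insert n []).modify n [] (fun l => l ++ [s])
          else d) d) (PySem.Dict.mk [])).contains x
          = decide (x ∈ PySem.List.dedup (u.flatMap (fun s => ns.filter (fun n => q n s)))) := by
        intro x
        rw [Bool.eq_iff_iff, pvContainsIff, hkeys]
        simp
      -- right-hand side: split the new sentence off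
      rw [List.flatMap_append]
      simp only [List.flatMap_cons, List.flatMap_nil, List.append_nil]
      rw [pvDedupAppend _ _ (List.Nodup.filter _ hns), List.map_append]
      have hfilt2 : (ns.filter (fun n => q n s)).filter
              (fun x => !(decide (x ∈ PySem.List.dedup (u.flatMap (fun s => ns.filter (fun n => q n s))))))
          = ns.filter (fun n => (fun n => q n s) n && !((u.foldl (fun d s => ns.foldl (fun d n =>
              if q n s then
                (if d.contains n then d else d.insert n []).modify n [] (fun l => l ++ [s])
              else d) d) (PySem.Dict.mk [])).contains n)) := by
        rw [List.filter_filter]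
        apply List.filter_congr
        intro n _
        rw [hcont n]
        simp [Bool.and_comm]
      rw [hfilt2]
      congr 1
      · -- existing keys: append s to the matching ones
        apply List.map_congr_left
        intro n hmem
        have hnns : n ∈ ns := hsub n hmem
        have hsplit : (u ++ [s]).filter (fun s' => q n s')
            = u.filter (fun s' => q n s') ++ if q n s then [s] else [] := by
          rw [List.filter_append]
          congr 1
          cases h : q n s <;> simp [h]
        by_cases hq : q n s = true
        · simp [Function.comp, hnns, hq, hsplit]
        · have hq' : q n s = false := by
            cases h : q n s with
            | true => exact absurd h hq
            | false => rfl
          simp [Function.comp, hnns, hq', hsplit]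
      · -- new keys: their first (and so far only) matching sentence is s
        apply List.map_congr_left
        intro n hmem
        have hinfo := List.mem_filter.mp hmem
        have hnns : n ∈ ns := hinfo.1
        have hb0 := hinfo.2
        rw [hcont n] at hb0
        simp only [Bool.and_eq_true, Bool.not_eq_true', decide_eq_false_iff_not] at hb0
        have h1 : q n s = true := hb0.1
        have h2 : n ∉ PySem.List.dedup (u.flatMap (fun s => ns.filter (fun n => q n s))) := hb0.2
        have hnou : u.filter (fun s' => q n s') = [] := by
          apply List.filter_eq_nil_iff.mpr
          intro s' hs' hq'
          apply h2
          apply (PySem.List.mem_dedup _ _).mpr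
          exact List.mem_flatMap.mpr ⟨s', hs', List.mem_filter.mpr ⟨hnns, hq'⟩⟩
        rw [List.filter_append]
        simp [hnou, List.filter, h1]

-- ===== VERDICT (by name: the statement is the Claim_ definition above) =====
theorem extract_character_interactions_py_spec : Claim_equal_extract_character_interactions_py := by
  intro narrative_text characters _hdom
  unfold Spec_extract_character_interactions_py
  unfold extract_character_interactions_py extract_character_interactions_py_alt
  dsimp only
  -- shared pieces of the two programs
  have hkeysCM : (characters.foldl (fun d ch =>
        d.insert (PySem.Str.lower ((PySem.Dict.mk ch).getD "name" "")) ch) (PySem.Dict.mk [])).keys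
      = PySem.List.dedup (characters.map (fun ch => PySem.Str.lower ((PySem.Dict.mk ch).getD "name" ""))) := by
    rw [pvCharMapKeys]
    rfl
  -- fold over the char_map items = fold over its keys (only the key is used)
  have hinner : ∀ (inter : PySem.Dict String (List String)) (s : String),
      (characters.foldl (fun d ch =>
          d.insert (PySem.Str.lower ((PySem.Dict.mk ch).getD "name" "")) ch) (PySem.Dict.mk [])).items.foldl
        (fun inter kv => if PySem.Str.isIn kv.1 (PySem.Str.lower s) then
            (if inter.contains kv.1 then inter else inter.insert kv.1 []).modify kv.1 [] (fun l => l ++ [s])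
          else inter) inter
      = (PySem.List.dedup (characters.map (fun ch => PySem.Str.lower ((PySem.Dict.mk ch).getD "name" "")))).foldl
        (fun inter n => if PySem.Str.isIn n (PySem.Str.lower s) then
            (if inter.contains n then inter else inter.insert n []).modify n [] (fun l => l ++ [s])
          else inter) inter := by
    intro inter s
    rw [← hkeysCM]
    rw [show (characters.foldl (fun d ch =>
          d.insert (PySem.Str.lower ((PySem.Dict.mk ch).getD "name" "")) ch) (PySem.Dict.mk [])).keys
        = (characters.foldl (fun d ch =>
          d.insert (PySem.Str.lower ((PySem.Dict.mk ch).getD "name" "")) ch) (PySem.Dict.mk [])).items.map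
            (fun x : String × List (String × String) => x.1) from rfl]
    rw [List.foldl_map]
  -- A's sentence loop: strip first, drop empties, then run the per-sentence loop
  have hA : (((PySem.Str.split? narrative_text ".").getD []).foldl (fun inter sentence =>
        let s := PySem.Str.strip sentence
        if s == "" then inter
        else (characters.foldl (fun d ch =>
            d.insert (PySem.Str.lower ((PySem.Dict.mk ch).getD "name" "")) ch) (PySem.Dict.mk [])).items.foldl
          (fun inter kv => if PySem.Str.isIn kv.1 (PySem.Str.lower s) then
              (if inter.contains kv.1 then inter else inter.insert kv.1 []).modify kv.1 [] (fun l => l ++ [s])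
            else inter) inter) (PySem.Dict.mk []))
      = ((((PySem.Str.split? narrative_text ".").getD []).map PySem.Str.strip).filter
            (fun s => !(s == ""))).foldl (fun inter s =>
          (PySem.List.dedup (characters.map (fun ch => PySem.Str.lower ((PySem.Dict.mk ch).getD "name" "")))).foldl
            (fun inter n => if PySem.Str.isIn n (PySem.Str.lower s) then
                (if inter.contains n then inter else inter.insert n []).modify n [] (fun l => l ++ [s])
              else inter) inter) (PySem.Dict.mk []) := by
    rw [PySem.List.foldl_congr_mem _ _ (fun inter sentence =>
        if !(PySem.Str.strip sentence == "") then
          (PySem.List.dedup (characters.map (fun ch => PySem.Str.lower ((PySem.Dict.mk ch).getD "name" "")))).foldl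
            (fun inter n => if PySem.Str.isIn n (PySem.Str.lower (PySem.Str.strip sentence)) then
                (if inter.contains n then inter else inter.insert n []).modify n [] (fun l => l ++ [PySem.Str.strip sentence])
              else inter) inter
        else inter) _ ?_]
    · rw [show (fun (inter : PySem.Dict String (List String)) sentence =>
          if !(PySem.Str.strip sentence == "") then
            (PySem.List.dedup (characters.map (fun ch => PySem.Str.lower ((PySem.Dict.mk ch).getD "name" "")))).foldl
              (fun inter n => if PySem.Str.isIn n (PySem.Str.lower (PySem.Str.strip sentence)) then
                  (if inter.contains n then inter else inter.insert n []).modify n [] (fun l => l ++ [PySem.Str.strip sentence])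
                else inter) inter
          else inter)
        = (fun (inter : PySem.Dict String (List String)) sentence =>
            (fun inter s =>
              if !(s == "") then
                (PySem.List.dedup (characters.map (fun ch => PySem.Str.lower ((PySem.Dict.mk ch).getD "name" "")))).foldl
                  (fun inter n => if PySem.Str.isIn n (PySem.Str.lower s) then
                      (if inter.contains n then inter else inter.insert n []).modify n [] (fun l => l ++ [s])
                    else inter) inter
              else inter) inter (PySem.Str.strip sentence)) from rfl]
      rw [← List.foldl_map (f := PySem.Str.strip)
            (g := fun (inter : PySem.Dict String (List String)) s =>
              if !(s == "") then
                (PySem.List.dedup (characters.map (fun ch => PySem.Str.lower ((PySem.Dict.mk ch).getD "name" "")))).foldl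
                  (fun inter n => if PySem.Str.isIn n (PySem.Str.lower s) then
                      (if inter.contains n then inter else inter.insert n []).modify n [] (fun l => l ++ [s])
                    else inter) inter
              else inter)]
      rw [PySem.List.foldl_if_eq_foldl_filter]
    · intro acc x _
      dsimp only
      by_cases hh : (PySem.Str.strip x == "") = true
      · rw [if_pos hh, if_neg (by simp [hh])]
      · rw [if_neg hh, if_pos (by simp [hh]), hinner]
  rw [hA]
  rw [pvOuterFold (fun n s => PySem.Str.isIn n (PySem.Str.lower s)) _ (PySem.List.nodup_dedup _)]
  -- B's side: the cached (sentence, lowered) pairs project back to the same data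
  rw [List.flatMap_map]
  dsimp only
  apply List.map_congr_left
  intro n _
  simp only [List.filter_map, List.map_map]
  rfl
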